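-- pv_equiv track=rewrite | github.com/RedLincoln/Knight-s-tour-backtracking | KnightsTour/ProblemConstraints.py | is_valid_combination
-- ===== SOURCE A (Python) =====
-- _n = 5
--
-- def is_different_position(array, position):
--     """
--     check if  position is different from those stored in array
--     :param array: array of positions
--     :param position: position to be checked
--     :return: True if it is different
--     """
--     for i in range(len(array)):
--         if (position[0] == array[i][0]) & (position[1] == array[i][1]):
--             return False
--     return True
--
-- def in_range(position):
--     """
--     check if the position is inside of the board
--     :param position: position to be checked
--     :return: True if positions is inside of the board
--     """
--     return (position[0] >= 0) & (position[0] < _n) & (position[1] >= 0) & (position[1] < _n)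
--
-- def is_valid_combination(comb_list):
--     """
--     check if the list of positions is valid
--     :param comb_list: list of positions
--     :return: True if comb_list is valid
--     """
--     for i in comb_list:
--         if not (in_range(i)):
--             return False
--
--     for i in range(1, len(comb_list) + 1):
--         if not (is_different_position(comb_list[0:-i], comb_list[-i])):
--             return False
--     return True
-- ===== SOURCE B (Python) =====
-- _n = 5
--
-- def is_valid_combination(comb_list):
--     for p in comb_list:
--         if not (0 <= p[0] < _n and 0 <= p[1] < _n):
--             return False
--     cells = sorted(p[0] * _n + p[1] for p in comb_list)
--     for a, b in zip(cells, cells[1:]):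
--         if a == b:
--             return False
--     return True
-- ===== Notes on version B (the rewrite author's own statement) =====
-- stated objective: alternative
-- what changed: A's end-anchored all-pairs duplicate scan over prefix slices is replaced by linearizing each in-range position to a single board-cell index p[0]*_n+p[1] (injective once the range check passed), sorting those indices and making one pass comparing adjacent elements.
import Mathlib
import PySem

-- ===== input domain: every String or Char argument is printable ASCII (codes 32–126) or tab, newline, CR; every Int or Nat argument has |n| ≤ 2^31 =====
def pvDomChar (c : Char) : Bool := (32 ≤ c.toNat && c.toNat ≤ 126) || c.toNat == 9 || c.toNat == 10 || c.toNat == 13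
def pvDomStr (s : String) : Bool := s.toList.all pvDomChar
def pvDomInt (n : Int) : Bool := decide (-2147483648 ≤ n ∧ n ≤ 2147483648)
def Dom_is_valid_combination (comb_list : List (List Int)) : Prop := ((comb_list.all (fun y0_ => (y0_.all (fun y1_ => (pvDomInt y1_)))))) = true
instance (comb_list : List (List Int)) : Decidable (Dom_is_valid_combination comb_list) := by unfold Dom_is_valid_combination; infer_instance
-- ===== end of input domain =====

-- B replaces A's end-anchored all-pairs duplicate scan by linearizing each (already range-checked)
-- position to a single board-cell index p[0]*5+p[1], sorting those indices and scanning adjacent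
-- pairs once (alternative decomposition; return value only, neither program mutates its argument).

-- ===== PORT A =====
-- in_range(position)  (Python's & on bools behaves as 'and' here)
def pvInRange (position : List Int) : Bool :=
  decide (0 ≤ PySem.List.pyGetD position 0 0) && decide (PySem.List.pyGetD position 0 0 < 5) &&
  decide (0 ≤ PySem.List.pyGetD position 1 0) && decide (PySem.List.pyGetD position 1 0 < 5)

-- is_different_position(array, position): the 'for i in range(len(array))' index loop,
-- as the obvious structural recursion over array
def pvIsDifferentPosition (array : List (List Int)) (position : List Int) : Bool :=
  match array with
  | [] => true
  | a :: rest =>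
      if (PySem.List.pyGetD position 0 0 == PySem.List.pyGetD a 0 0) &&
         (PySem.List.pyGetD position 1 0 == PySem.List.pyGetD a 1 0) then false
      else pvIsDifferentPosition rest position

-- first loop of is_valid_combination: 'for i in comb_list: if not in_range(i): return False'
def pvLoopRangeA : List (List Int) → Bool
  | [] => true
  | p :: rest => if !(pvInRange p) then false else pvLoopRangeA rest

-- second loop: 'for i in range(1, len(comb_list)+1):
--                 if not is_different_position(comb_list[0:-i], comb_list[-i]): return False'
def pvLoopDiffA (comb_list : List (List Int)) : List Int → Bool
  | [] => true
  | i :: rest =>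
      if !(pvIsDifferentPosition (PySem.List.slice comb_list (some 0) (some (-i)))
            (PySem.List.pyGetD comb_list (-i) [])) then false
      else pvLoopDiffA comb_list rest

def is_valid_combination (comb_list : List (List Int)) : Bool :=
  if pvLoopRangeA comb_list then
    pvLoopDiffA comb_list (PySem.List.pyRange 1 ((comb_list.length : Int) + 1) 1)
  else false

-- ===== PORT B =====
-- first loop of B: '0 <= p[0] < _n and 0 <= p[1] < _n'
def pvLoopRangeB : List (List Int) → Bool
  | [] => true
  | p :: rest =>
      if !(decide (0 ≤ PySem.List.pyGetD p 0 0) && decide (PySem.List.pyGetD p 0 0 < 5) &&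
           decide (0 ≤ PySem.List.pyGetD p 1 0) && decide (PySem.List.pyGetD p 1 0 < 5)) then false
      else pvLoopRangeB rest

-- cell index p[0] * _n + p[1]
def pvCell (p : List Int) : Int := PySem.List.pyGetD p 0 0 * 5 + PySem.List.pyGetD p 1 0

-- 'for a, b in zip(cells, cells[1:]): if a == b: return False'
def pvAdjScan : List Int → Bool
  | [] => true
  | [_] => true
  | a :: b :: rest => if a == b then false else pvAdjScan (b :: rest)

def is_valid_combination_alt (comb_list : List (List Int)) : Bool :=
  if pvLoopRangeB comb_list then
    pvAdjScan (PySem.List.sorted (comb_list.map pvCell) (fun x => x) false)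
  else false

-- ===== PRECONDITION & SPEC =====
-- Pre_ excludes exactly the inputs on which Python A raises IndexError: those containing a
-- position with fewer than two coordinates that is reached before any out-of-range position
-- (in_range accesses position[0] and position[1] unconditionally, so A raises there).
def Pre_is_valid_combination (comb_list : List (List Int)) : Prop :=
  ∀ i < comb_list.length, (comb_list.getD i []).length < 2 →
    ∃ j < i, 2 ≤ (comb_list.getD j []).length ∧
      ¬(0 ≤ PySem.List.pyGetD (comb_list.getD j []) 0 0 ∧
        PySem.List.pyGetD (comb_list.getD j []) 0 0 < 5 ∧
        0 ≤ PySem.List.pyGetD (comb_list.getD j []) 1 0 ∧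
        PySem.List.pyGetD (comb_list.getD j []) 1 0 < 5)
instance (comb_list : List (List Int)) : Decidable (Pre_is_valid_combination comb_list) := by
  unfold Pre_is_valid_combination; infer_instance
def pvWitness_is_valid_combination : List (List Int) := [[0, 0], [1, 2]]

def Spec_is_valid_combination (comb_list : List (List Int)) (out : Bool) : Prop :=
  out = is_valid_combination_alt comb_list
instance (comb_list : List (List Int)) (out : Bool) : Decidable (Spec_is_valid_combination comb_list out) := by
  unfold Spec_is_valid_combination; infer_instance

-- ===== CLAIM (what is proved, stated in full; the proofs are below) =====
def Claim_equal_is_valid_combination : Prop :=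
  ∀ (comb_list : List (List Int)), Dom_is_valid_combination comb_list →
    Pre_is_valid_combination comb_list →
    Spec_is_valid_combination comb_list (is_valid_combination comb_list)

-- ===== LEMMAS AND PROOFS =====

def pvKey (p : List Int) : Int × Int := (PySem.List.pyGetD p 0 0, PySem.List.pyGetD p 1 0)

-- the two in-range loops are the same computation
theorem loopRange_eq (l : List (List Int)) : pvLoopRangeA l = pvLoopRangeB l := by
  induction l with
  | nil => rfl
  | cons p rest ih => simp [pvLoopRangeA, pvLoopRangeB, pvInRange, ih]

-- the range loop succeeding means every position is in range
theorem loopRangeB_forall (l : List (List Int)) :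
    pvLoopRangeB l = true ↔ ∀ p ∈ l, 0 ≤ PySem.List.pyGetD p 0 0 ∧ PySem.List.pyGetD p 0 0 < 5 ∧
      0 ≤ PySem.List.pyGetD p 1 0 ∧ PySem.List.pyGetD p 1 0 < 5 := by
  induction l with
  | nil => simp [pvLoopRangeB]
  | cons p rest ih =>
      simp only [pvLoopRangeB, List.mem_cons]
      by_cases h : (decide (0 ≤ PySem.List.pyGetD p 0 0) && decide (PySem.List.pyGetD p 0 0 < 5) &&
           decide (0 ≤ PySem.List.pyGetD p 1 0) && decide (PySem.List.pyGetD p 1 0 < 5)) = true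
      · rw [h]
        simp only [Bool.not_true, Bool.false_eq_true, if_false, ih]
        simp only [Bool.and_eq_true, decide_eq_true_eq] at h
        constructor
        · intro hall q hq
          rcases hq with rfl | hq
          · exact ⟨h.1.1.1, h.1.1.2, h.1.2, h.2⟩
          · exact hall q hq
        · intro hall q hq; exact hall q (Or.inr hq)
      · rw [Bool.not_eq_true] at h
        rw [h]
        simp only [Bool.not_false, if_true]
        constructor
        · intro hc; cases hc
        · intro hall
          have hp := hall p (Or.inl rfl)
          simp [hp.1, hp.2.1, hp.2.2.1, hp.2.2.2] at h

-- A's inner scan decides key-membership in the prefix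
theorem isDifferent_eq (array : List (List Int)) (position : List Int) :
    pvIsDifferentPosition array position = !(decide (pvKey position ∈ array.map pvKey)) := by
  induction array with
  | nil => simp [pvIsDifferentPosition]
  | cons a rest ih =>
      simp only [pvIsDifferentPosition, ih, List.map_cons, List.mem_cons]
      by_cases h : pvKey position = pvKey a
      · have h1 : PySem.List.pyGetD position 0 0 = PySem.List.pyGetD a 0 0 := congrArg Prod.fst h
        have h2 : PySem.List.pyGetD position 1 0 = PySem.List.pyGetD a 1 0 := congrArg Prod.snd h
        simp [h, h1, h2]
      · have hc : ¬ (((PySem.List.pyGetD position 0 0 == PySem.List.pyGetD a 0 0) &&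
                  (PySem.List.pyGetD position 1 0 == PySem.List.pyGetD a 1 0)) = true) := by
          intro hc
          simp only [Bool.and_eq_true, beq_iff_eq] at hc
          exact h (Prod.ext hc.1 hc.2)
        rw [if_neg hc]
        simp [h]

-- A's second loop is a conjunction over the range list
theorem loopDiffA_all (comb : List (List Int)) (idxs : List Int) :
    pvLoopDiffA comb idxs =
      idxs.all (fun i => pvIsDifferentPosition (PySem.List.slice comb (some 0) (some (-i)))
                        (PySem.List.pyGetD comb (-i) [])) := by
  induction idxs with
  | nil => rfl
  | cons i rest ih =>
      simp only [pvLoopDiffA, List.all_cons, ih]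
      by_cases h : pvIsDifferentPosition (PySem.List.slice comb (some 0) (some (-i)))
                     (PySem.List.pyGetD comb (-i) []) = true
      · simp
      · simp

-- a list has no duplicates iff no element occurs in the prefix before it
theorem nodup_iff_not_mem_take {α : Type} (l : List α) :
    l.Nodup ↔ ∀ (j : Nat) (hj : j < l.length), l[j] ∉ l.take j := by
  rw [List.Nodup, List.pairwise_iff_getElem]
  constructor
  · intro h j hj hmem
    obtain ⟨i, hi, heq⟩ := List.mem_take_iff_getElem.mp hmem
    exact h i j (by omega) hj (by omega) heq
  · intro h i j hi hj hij heq
    exact h j hj (List.mem_take_iff_getElem.mpr ⟨i, by omega, heq⟩)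

-- A's second loop over range(1, n+1) decides that the keys are pairwise distinct
theorem loopDiffA_eq_nodup (comb : List (List Int)) :
    (pvLoopDiffA comb (PySem.List.pyRange 1 ((comb.length : Int) + 1) 1) = true) ↔
      (comb.map pvKey).Nodup := by
  rw [loopDiffA_all]
  simp only [List.all_eq_true]
  rw [nodup_iff_not_mem_take]
  constructor
  · intro h j hj
    have hj' : j < comb.length := by simpa using hj
    set k : Nat := comb.length - j with hk
    have hk1 : 0 < k := by omega
    have hk2 : k ≤ comb.length := by omega
    have hmem' : ((k : Int)) ∈ PySem.List.pyRange 1 ((comb.length : Int) + 1) 1 := by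
      rw [PySem.List.mem_pyRange_one]
      refine ⟨by exact_mod_cast hk1, by omega⟩
    have := h _ hmem'
    rw [isDifferent_eq] at this
    simp only [Bool.not_eq_eq_eq_not, Bool.not_true, decide_eq_false_iff_not] at this
    intro hcontra
    apply this
    have hs : PySem.List.slice comb (some 0) (some (-(k : Int))) = comb.take (comb.length - k) := by
      rw [PySem.List.slice_zero_start, PySem.List.slice_to_neg_natCast _ _ hk1]
    have hg : PySem.List.pyGetD comb (-(k : Int)) ([] : List Int) = comb[comb.length - k]'(by omega) := by
      rw [PySem.List.pyGetD_neg_natCast _ _ _ hk1 hk2]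
    have hjk : comb.length - k = j := by omega
    rw [hs, hg]
    simp only [hjk]
    rw [← List.map_take] at hcontra
    have : pvKey (comb[j]'hj') = (comb.map pvKey)[j]'(by simpa using hj') := by
      simp
    rw [this]
    simpa using hcontra
  · intro h i hi
    rw [PySem.List.mem_pyRange_one] at hi
    obtain ⟨hi1, hi2⟩ := hi
    obtain ⟨k, rfl⟩ : ∃ k : Nat, i = (k : Int) := ⟨i.toNat, by omega⟩
    have hk1 : 0 < k := by exact_mod_cast hi1
    have hk2 : k ≤ comb.length := by
      have : (k : Int) ≤ (comb.length : Int) := by omega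
      exact_mod_cast this
    rw [isDifferent_eq]
    simp only [Bool.not_eq_eq_eq_not, Bool.not_true, decide_eq_false_iff_not]
    rw [PySem.List.slice_zero_start, PySem.List.slice_to_neg_natCast _ _ hk1,
        PySem.List.pyGetD_neg_natCast _ _ _ hk1 hk2]
    intro hcontra
    have hj : comb.length - k < (comb.map pvKey).length := by simp; omega
    apply h (comb.length - k) hj
    rw [List.map_take] at hcontra
    have : (comb.map pvKey)[comb.length - k]'hj = pvKey (comb[comb.length - k]'(by omega)) := by
      simp
    rw [this]
    exact hcontra

-- on a ≤-sorted list, the adjacent scan decides Nodup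
theorem adjScan_nodup (l : List Int) (hp : l.Pairwise (· ≤ ·)) :
    pvAdjScan l = true ↔ l.Nodup := by
  induction l with
  | nil => simp [pvAdjScan]
  | cons a t ih =>
      cases t with
      | nil => simp [pvAdjScan]
      | cons b rest =>
          rw [List.pairwise_cons] at hp
          obtain ⟨hale, hpt⟩ := hp
          have hab : a ≤ b := hale b (List.mem_cons_self ..)
          by_cases h : a = b
          · subst h
            simp only [pvAdjScan, beq_self_eq_true, if_true]
            constructor
            · intro hc; cases hc
            · intro hn; exact absurd (List.mem_cons_self ..) (List.nodup_cons.mp hn).1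
          · have hne : (a == b) = false := by simp [h]
            simp only [pvAdjScan, hne, Bool.false_eq_true, if_false]
            rw [ih hpt]
            have hani : a ∉ b :: rest := by
              intro hmem
              rcases List.mem_cons.mp hmem with rfl | hmem
              · exact h rfl
              · have hb : b ≤ a := (List.pairwise_cons.mp hpt).1 a hmem
                exact h (le_antisymm hab hb)
            constructor
            · intro hn; exact List.nodup_cons.mpr ⟨hani, hn⟩
            · intro hn; exact (List.nodup_cons.mp hn).2

-- cell indices and keys have the same Nodup once every position is in range
theorem cells_nodup_iff (comb : List (List Int))
    (hr : ∀ p ∈ comb, 0 ≤ PySem.List.pyGetD p 0 0 ∧ PySem.List.pyGetD p 0 0 < 5 ∧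
      0 ≤ PySem.List.pyGetD p 1 0 ∧ PySem.List.pyGetD p 1 0 < 5) :
    (comb.map pvCell).Nodup ↔ (comb.map pvKey).Nodup := by
  have hmap : comb.map pvCell = (comb.map pvKey).map (fun k => k.1 * 5 + k.2) := by
    simp only [List.map_map]
    rfl
  rw [hmap]
  constructor
  · exact List.Nodup.of_map _
  · intro h
    refine h.map_on ?_
    intro x hx y hy hxy
    obtain ⟨p, hp, rfl⟩ := List.mem_map.mp hx
    obtain ⟨q, hq, rfl⟩ := List.mem_map.mp hy
    obtain ⟨h0p, h0p', h1p, h2p⟩ := hr p hp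
    obtain ⟨h0q, h0q', h1q, h2q⟩ := hr q hq
    simp only [pvKey] at hxy h0p h0p' h1p h2p h0q h0q' h1q h2q ⊢
    have h1 : PySem.List.pyGetD p 0 0 = PySem.List.pyGetD q 0 0 := by omega
    have h2 : PySem.List.pyGetD p 1 0 = PySem.List.pyGetD q 1 0 := by omega
    rw [h1, h2]

-- ===== VERDICT (by name: the statement is the Claim_ definition above) =====
theorem is_valid_combination_spec : Claim_equal_is_valid_combination := by
  unfold Claim_equal_is_valid_combination
  intro comb _ _
  unfold Spec_is_valid_combination is_valid_combination is_valid_combination_alt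
  rw [loopRange_eq]
  by_cases h : pvLoopRangeB comb = true
  · rw [if_pos h, if_pos h]
    have hr := (loopRangeB_forall comb).mp h
    have hsp : (PySem.List.sorted (comb.map pvCell) (fun x => x) false).Pairwise (· ≤ ·) := by
      simpa using PySem.List.sorted_pairwise (comb.map pvCell) (fun x => x)
    have hiff : pvLoopDiffA comb (PySem.List.pyRange 1 ((comb.length : Int) + 1) 1) = true ↔
        pvAdjScan (PySem.List.sorted (comb.map pvCell) (fun x => x) false) = true := by
      rw [loopDiffA_eq_nodup, adjScan_nodup _ hsp,
          (PySem.List.sorted_perm (comb.map pvCell) (fun x => x) false).nodup_iff,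
          cells_nodup_iff comb hr]
    by_cases hA : pvLoopDiffA comb (PySem.List.pyRange 1 ((comb.length : Int) + 1) 1) = true
    · rw [hA, hiff.mp hA]
    · have hB : ¬ pvAdjScan (PySem.List.sorted (comb.map pvCell) (fun x => x) false) = true :=
        fun hb => hA (hiff.mpr hb)
      rw [Bool.not_eq_true] at hA hB
      rw [hA, hB]
  · rw [if_neg h, if_neg h]
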